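-- pv_equiv track=rewrite | github.com/Nithin1729S/iste.nitk.ac.in | backend-code/cryptonite/blackbox.py | function7
-- ===== SOURCE A (Python) =====
-- def function7(seq):
--     sum  = 0
--     for i in seq:
--         if i < 0:
--             return 'Invalid input sequence. Negative numbers not allowed.'
--         s = bin(i)
--         s = str(s)[2:]
--         for j in s:
--             sum += int(j)
--     if(sum%2 == 0):
--         return 0
--     else: return 1
-- ===== SOURCE B (Python) =====
-- def function7(seq):
--     x = 0
--     for i in seq:
--         if i < 0:
--             return 'Invalid input sequence. Negative numbers not allowed.'
--         x ^= i
--     return x.bit_count() & 1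
-- ===== Notes on version B (the rewrite author's own statement) =====
-- stated objective: alternative
-- what changed: Instead of converting each number to a binary string and summing its digit characters, B XOR-folds the sequence with one int op per element and takes the parity of a single final popcount, using the identity that the parity of the total set-bit count equals the popcount parity of the XOR of all elements.
import Mathlib
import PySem

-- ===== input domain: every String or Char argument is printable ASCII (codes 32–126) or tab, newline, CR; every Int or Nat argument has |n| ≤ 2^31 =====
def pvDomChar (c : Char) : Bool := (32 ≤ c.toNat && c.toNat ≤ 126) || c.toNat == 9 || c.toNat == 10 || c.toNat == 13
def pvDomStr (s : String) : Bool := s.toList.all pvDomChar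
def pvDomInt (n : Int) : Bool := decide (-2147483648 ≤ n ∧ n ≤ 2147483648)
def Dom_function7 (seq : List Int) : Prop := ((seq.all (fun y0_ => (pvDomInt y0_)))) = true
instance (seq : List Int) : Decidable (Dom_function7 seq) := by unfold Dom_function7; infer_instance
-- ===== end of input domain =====

-- B replaces the per-element binary-string digit sum with an XOR fold and one final popcount;
-- equivalence rests on parity(Σ popcount) = parity(popcount(XOR-fold)).

-- ===== PORT A =====
-- one loop step of A: on a negative element A returns an error STRING (excluded by Pre_; -1 here),
-- otherwise bin(i), slice off "0b", and sum int(j) over the digit characters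
def function7Go : List Int → Int → Int
  | [], sum => if PySem.Int.mod sum 2 == 0 then 0 else 1
  | i :: rest, sum =>
    if i < 0 then -1  -- A returns 'Invalid input sequence. …' (a string) here; outside Pre_function7
    else
      let s := PySem.Int.toBinChars0b i                    -- s = bin(i)  (as its character list)
      let s2 := PySem.List.slice s (some 2) none           -- s = str(s)[2:]
      function7Go rest
        (s2.foldl (fun acc j => acc + (PySem.Int.ofChars? [j]).getD 0) sum)  -- sum += int(j); never none on '0'/'1'

def function7 (seq : List Int) : Int := function7Go seq 0

-- ===== PORT B =====
def function7AltGo : List Int → Int → Int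
  | [], x => PySem.Int.band ((PySem.Int.bitCount x : Nat) : Int) 1   -- return x.bit_count() & 1
  | i :: rest, x =>
    if i < 0 then -1  -- B returns the same error string here; outside Pre_function7
    else function7AltGo rest (PySem.Int.bxor x i)          -- x ^= i

def function7_alt (seq : List Int) : Int := function7AltGo seq 0

-- ===== PRECONDITION & SPEC =====
-- Pre_ excludes sequences containing a negative element: there A (and B alike) returns an error
-- STRING, not a value of the declared Int result type.
def Pre_function7 (seq : List Int) : Prop := ∀ i ∈ seq, 0 ≤ i
instance (seq : List Int) : Decidable (Pre_function7 seq) := by unfold Pre_function7; infer_instance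
def pvWitness_function7 : List Int := [3, 0, 6]

def Spec_function7 (seq : List Int) (out : Int) : Prop := out = function7_alt seq
instance (seq : List Int) (out : Int) : Decidable (Spec_function7 seq out) := by unfold Spec_function7; infer_instance

-- ===== CLAIM (what is proved, stated in full; the proofs are below) =====
def Claim_equal_function7 : Prop := ∀ (seq : List Int), Dom_function7 seq → Pre_function7 seq → Spec_function7 seq (function7 seq)

-- ===== LEMMAS AND PROOFS =====

-- value of int(j) on a binary digit character
def pvChv (c : Char) : Int := (PySem.Int.ofChars? [c]).getD 0

theorem pvChv_digitChar (m : Nat) (h : m < 2) : pvChv (Nat.digitChar m) = (m : Int) := by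
  interval_cases m <;> decide

-- `Nat.toDigitsCore` with enough fuel and any accumulator is `Nat.toDigits` followed by the accumulator
theorem pvToDigitsCore_eq (n : Nat) : ∀ f acc, n ≤ f →
    Nat.toDigitsCore 2 (f + 1) n acc = Nat.toDigits 2 n ++ acc := by
  induction n using Nat.strong_induction_on with
  | _ n ih =>
    intro f acc _
    rw [Nat.toDigits, Nat.toDigitsCore, Nat.toDigitsCore]
    by_cases h2 : n / 2 = 0
    · simp [h2]
    · have hn2 : 2 ≤ n := by omega
      have hlt : n / 2 < n := Nat.div_lt_self (by omega) (by omega)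
      simp only [h2, if_false]
      obtain ⟨f', rfl⟩ : ∃ f', f = f' + 1 := ⟨f - 1, by omega⟩
      have e1 := ih (n / 2) hlt f' (Nat.digitChar (n % 2) :: acc) (by omega)
      have e2 : Nat.toDigitsCore 2 n (n / 2) [Nat.digitChar (n % 2)]
          = Nat.toDigits 2 (n / 2) ++ [Nat.digitChar (n % 2)] := by
        obtain ⟨n', hn'⟩ : ∃ n', n = n' + 1 := ⟨n - 1, by omega⟩
        have e := ih (n / 2) hlt n' [Nat.digitChar (n % 2)] (by omega)
        rwa [← hn'] at e
      rw [Nat.toDigits] at e1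
      rw [e1, e2, List.append_assoc]
      rfl

-- the digit sum of the binary representation is the popcount
theorem pvToDigits_sum (n : Nat) :
    ((Nat.toDigits 2 n).map pvChv).sum = ((PySem.Int.bitCount (n : Int) : Nat) : Int) := by
  induction n using Nat.strong_induction_on with
  | _ n ih =>
    rw [Nat.toDigits, Nat.toDigitsCore]
    by_cases h2 : n / 2 = 0
    · have hn : n < 2 := by omega
      interval_cases n <;> decide
    · have hlt : n / 2 < n := Nat.div_lt_self (by omega) (by omega)
      simp only [h2, if_false]
      have e2 : Nat.toDigitsCore 2 n (n / 2) [Nat.digitChar (n % 2)]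
          = Nat.toDigits 2 (n / 2) ++ [Nat.digitChar (n % 2)] := by
        obtain ⟨n', hn'⟩ : ∃ n', n = n' + 1 := ⟨n - 1, by omega⟩
        have e := pvToDigitsCore_eq (n / 2) n' [Nat.digitChar (n % 2)] (by omega)
        rwa [← hn'] at e
      rw [e2, List.map_append, List.sum_append, ih (n / 2) hlt,
        PySem.Int.bitCount_natCast (by omega : 0 < n)]
      simp [pvChv_digitChar (n % 2) (Nat.mod_lt n (by omega))]
      ring

-- halving commutes with xor
theorem pvXor_div_two (a b : Nat) : (a ^^^ b) / 2 = a / 2 ^^^ b / 2 := by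
  apply Nat.eq_of_testBit_eq
  intro i
  simp [Nat.testBit_div_two, Nat.testBit_xor]

-- parity of popcount of a xor = parity of the sum of popcounts
theorem pvPop_xor : ∀ n, ∀ a b : Nat, a + b ≤ n →
    PySem.Int.bitCount ((a ^^^ b : Nat) : Int) % 2
      = (PySem.Int.bitCount (a : Int) + PySem.Int.bitCount (b : Int)) % 2 := by
  intro n
  induction n using Nat.strong_induction_on with
  | _ n ih =>
    intro a b hab
    by_cases ha : a = 0
    · simp [ha]
    by_cases hb : b = 0
    · simp [hb]
    by_cases hx : a ^^^ b = 0
    · have hb' : a = b := Nat.xor_eq_zero_iff.mp hx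
      subst hb'
      simp [hx]
      omega
    · have h1 := PySem.Int.bitCount_natCast (show 0 < a ^^^ b by omega)
      have h2 := PySem.Int.bitCount_natCast (show 0 < a by omega)
      have h3 := PySem.Int.bitCount_natCast (show 0 < b by omega)
      have hih := ih (n - 1) (by omega) (a / 2) (b / 2) (by omega)
      rw [h1, h2, h3, pvXor_div_two, Nat.xor_mod_two_eq]
      omega

-- one element of A's loop adds popcount(i) to the running sum
theorem pvStep_eq (i : Int) (hi : 0 ≤ i) (sum : Int) :
    (PySem.List.slice (PySem.Int.toBinChars0b i) (some 2) none).foldl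
      (fun acc j => acc + (PySem.Int.ofChars? [j]).getD 0) sum
    = sum + ((PySem.Int.bitCount ((i.toNat : Nat) : Int) : Nat) : Int) := by
  have hbin : PySem.Int.toBinChars0b i = '0' :: 'b' :: Nat.toDigits 2 i.toNat := by
    rw [PySem.Int.toBinChars0b]
    simp [not_lt.mpr hi]
  rw [hbin, show ((2 : Int)) = ((2 : Nat) : Int) by norm_num, PySem.List.slice_from_natCast,
    show List.drop 2 ('0' :: 'b' :: Nat.toDigits 2 i.toNat) = Nat.toDigits 2 i.toNat from rfl,
    PySem.List.foldl_add _ (fun j => (PySem.Int.ofChars? [j]).getD 0),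
    show (List.map (fun j => (PySem.Int.ofChars? [j]).getD 0) (Nat.toDigits 2 i.toNat)) =
        List.map pvChv (Nat.toDigits 2 i.toNat) from rfl,
    pvToDigits_sum]

-- the loop invariant: equal parities of A's running sum and the popcount of B's XOR accumulator
theorem pvLoop_eq : ∀ (seq : List Int) (s x : Int), 0 ≤ s → 0 ≤ x →
    (∀ i ∈ seq, 0 ≤ i) →
    s.toNat % 2 = PySem.Int.bitCount x % 2 →
    function7Go seq s = function7AltGo seq x := by
  intro seq
  induction seq with
  | nil =>
    intro s x hs hx _ hpar
    rw [function7Go, function7AltGo]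
    have hband : PySem.Int.band ((PySem.Int.bitCount x : Nat) : Int) 1
        = ((PySem.Int.bitCount x % 2 : Nat) : Int) := by
      have h := PySem.Int.band_natCast (PySem.Int.bitCount x) 1
      simpa [Nat.and_one_is_mod] using h
    have hmod : PySem.Int.mod s 2 = ((s.toNat % 2 : Nat) : Int) := by
      rw [PySem.Int.mod_eq_emod_of_pos (by omega)]
      omega
    rw [hband, hmod, ← hpar]
    rcases Nat.mod_two_eq_zero_or_one s.toNat with h | h <;> simp [h]
  | cons i rest ih =>
    intro s x hs hx hpre hpar
    have hi : 0 ≤ i := hpre i (by simp)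
    rw [function7Go, function7AltGo]
    simp only [not_lt.mpr hi, if_false]
    rw [pvStep_eq i hi s, PySem.Int.bxor_of_nonneg hx hi]
    apply ih
    · omega
    · omega
    · intro j hj; exact hpre j (by simp [hj])
    · have hxor := pvPop_xor (x.toNat + i.toNat) x.toNat i.toNat (le_refl _)
      have hx' : PySem.Int.bitCount x = PySem.Int.bitCount ((x.toNat : Nat) : Int) := by
        rw [Int.toNat_of_nonneg hx]
      rw [hxor, ← hx'] at *
      omega

-- ===== VERDICT (by name: the statement is the Claim_ definition above) =====
theorem function7_spec : Claim_equal_function7 := by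
  intro seq _ hpre
  unfold Spec_function7 function7 function7_alt
  exact pvLoop_eq seq 0 0 (by omega) (by omega) hpre (by decide)
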